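-- pv_equiv track=rewrite | github.com/JohnYeu/pathway-prediction2 | scripts/process_chebi_to_pathways_v2.py | char_edit_distance_at_most_one
-- ===== SOURCE A (Python) =====
-- def char_edit_distance_at_most_one(left: str, right: str) -> bool:
--     """Fast bounded edit-distance check for <= 1 character change."""
--
--     if left == right:
--         return True
--     if abs(len(left) - len(right)) > 1:
--         return False
--     if len(left) == len(right):
--         return sum(left_char != right_char for left_char, right_char in zip(left, right)) <= 1
--     if len(left) > len(right):
--         left, right = right, left
--     left_index = 0
--     right_index = 0
--     skipped = False
--     while left_index < len(left) and right_index < len(right):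
--         if left[left_index] == right[right_index]:
--             left_index += 1
--             right_index += 1
--             continue
--         if skipped:
--             return False
--         skipped = True
--         right_index += 1
--     return True
-- ===== SOURCE B (Python) =====
-- def char_edit_distance_at_most_one(left: str, right: str) -> bool:
--     if len(left) > len(right):
--         left, right = right, left
--     if len(right) - len(left) > 1:
--         return False
--     i = 0
--     while i < len(left) and left[i] == right[i]:
--         i += 1
--     if len(left) == len(right):
--         return left[i + 1:] == right[i + 1:]
--     return left[i:] == right[i + 1:]
-- ===== Notes on version B (the rewrite author's own statement) =====
-- stated objective: simpler
-- what changed: Replaces A's three-way case analysis (string equality test, mismatch counter over zip, and a two-pointer loop with a skipped flag) by one uniform scheme: normalize so the first string is shorter, advance one index past the common prefix, then decide by a single suffix slice comparison.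
import Mathlib
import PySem

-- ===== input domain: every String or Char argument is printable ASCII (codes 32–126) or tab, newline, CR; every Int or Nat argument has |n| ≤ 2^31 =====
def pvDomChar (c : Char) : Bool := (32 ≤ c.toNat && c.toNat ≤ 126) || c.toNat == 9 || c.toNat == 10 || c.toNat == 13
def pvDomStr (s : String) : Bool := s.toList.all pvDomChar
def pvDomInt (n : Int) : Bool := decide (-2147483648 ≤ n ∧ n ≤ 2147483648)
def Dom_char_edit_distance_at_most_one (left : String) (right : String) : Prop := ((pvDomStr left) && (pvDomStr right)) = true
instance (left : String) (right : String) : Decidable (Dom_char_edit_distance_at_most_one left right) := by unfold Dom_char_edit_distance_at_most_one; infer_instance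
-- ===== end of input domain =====

-- B replaces A's mismatch counter and skipped-flag two-pointer loop by a common-prefix
-- scan followed by one suffix comparison (objective: simpler; same O(n) cost).

-- ===== PORT A =====
-- A's while loop (left/right two-pointer with a 'skipped' flag); recursion consumes the
-- lists in step with the indices: equal heads advance both, a mismatch with skipped=false
-- advances only the right list; any list exhausted → True.
def pvALoop : List Char → List Char → Bool → Bool
  | a :: s, b :: t, skipped =>
      if a = b then pvALoop s t skipped
      else if skipped then false
      else pvALoop (a :: s) t true
  | _, _, _ => true
termination_by _ t _ => t.length

def char_edit_distance_at_most_one (left : String) (right : String) : Bool :=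
  let l := left.toList
  let r := right.toList
  if l = r then true
  else if ((l.length : Int) - (r.length : Int)).natAbs > 1 then false
  else if l.length = r.length then
    decide (((l.zip r).countP (fun p => p.1 != p.2)) ≤ 1)
  else
    let p := if l.length > r.length then (r, l) else (l, r)
    pvALoop p.1 p.2 false

-- ===== PORT B =====
-- Source B's prefix loop plus slice comparison: advance while heads agree; on exit compare
-- the remaining slices (i+1-offsets for equal length, i/i+1 otherwise).
def pvAltCore : List Char → List Char → Bool
  | a :: s, b :: t =>
      if a = b then pvAltCore s t
      else if (a :: s).length = (b :: t).length then decide (s = t)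
      else decide ((a :: s) = t)
  | s, t =>
      if s.length = t.length then true else decide (s = t.drop 1)

def char_edit_distance_at_most_one_alt (left : String) (right : String) : Bool :=
  let p := if left.toList.length > right.toList.length then (right.toList, left.toList)
           else (left.toList, right.toList)
  if p.2.length - p.1.length > 1 then false
  else pvAltCore p.1 p.2

-- ===== PRECONDITION & SPEC =====
def Spec_char_edit_distance_at_most_one (left : String) (right : String) (out : Bool) : Prop := out = char_edit_distance_at_most_one_alt left right
instance (left : String) (right : String) (out : Bool) : Decidable (Spec_char_edit_distance_at_most_one left right out) := by unfold Spec_char_edit_distance_at_most_one; infer_instance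

-- ===== CLAIM (what is proved, stated in full; the proofs are below) =====
def Claim_equal_char_edit_distance_at_most_one : Prop := ∀ (left : String) (right : String), Dom_char_edit_distance_at_most_one left right → Spec_char_edit_distance_at_most_one left right (char_edit_distance_at_most_one left right)

-- ===== LEMMAS AND PROOFS =====

theorem pvAltCore_refl (s : List Char) : pvAltCore s s = true := by
  induction s with
  | nil => simp [pvAltCore]
  | cons a s ih => simp [pvAltCore, ih]

theorem pvCount_zero (s t : List Char) (h : s.length = t.length) :
    ((s.zip t).countP (fun p => p.1 != p.2)) = 0 ↔ s = t := by
  induction s generalizing t with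
  | nil =>
    cases t with
    | nil => simp
    | cons b t => simp at h
  | cons c s ih =>
    cases t with
    | nil => simp at h
    | cons d t =>
      simp only [List.length_cons, Nat.succ_inj] at h
      by_cases hcd : c = d
      · subst hcd
        simp [List.zip_cons_cons, ih t h]
      · simp [List.zip_cons_cons, hcd]

theorem pvAltCore_eq_count (s t : List Char) (h : s.length = t.length) :
    pvAltCore s t = decide (((s.zip t).countP (fun p => p.1 != p.2)) ≤ 1) := by
  induction s generalizing t with
  | nil =>
    cases t with
    | nil => simp [pvAltCore]
    | cons b t => simp at h
  | cons a s ih =>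
    cases t with
    | nil => simp at h
    | cons b t =>
      simp only [List.length_cons, Nat.succ_inj] at h
      by_cases hab : a = b
      · subst hab
        simp [pvAltCore, ih t h, List.zip_cons_cons]
      · have hc : (((a, b).1 != (a, b).2) = true) := by simp [bne_iff_ne, hab]
        simp only [pvAltCore, hab, if_false, List.length_cons, h,
          List.zip_cons_cons, List.countP_cons, hc, if_true]
        by_cases hst : s = t
        · subst hst
          have h0 : ((s.zip s).countP (fun p => p.1 != p.2)) = 0 :=
            (pvCount_zero s s rfl).mpr rfl
          simp [h0]
        · have h0 : ((s.zip t).countP (fun p => p.1 != p.2)) ≠ 0 :=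
            fun hz => hst ((pvCount_zero s t h).mp hz)
          simp [hst, h0]

theorem pvALoop_skipped (s t : List Char) (h : s.length = t.length) :
    pvALoop s t true = decide (s = t) := by
  induction s generalizing t with
  | nil =>
    cases t with
    | nil => simp [pvALoop]
    | cons b t => simp at h
  | cons a s ih =>
    cases t with
    | nil => simp at h
    | cons b t =>
      simp only [List.length_cons, Nat.succ_inj] at h
      by_cases hab : a = b
      · subst hab; simp [pvALoop, ih t h]
      · simp [pvALoop, hab]

theorem pvALoop_eq_altCore (s t : List Char) (h : t.length = s.length + 1) :
    pvALoop s t false = pvAltCore s t := by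
  induction s generalizing t with
  | nil =>
    cases t with
    | nil => simp at h
    | cons b t =>
      simp only [List.length_cons, Nat.succ_inj] at h
      have : t = [] := List.length_eq_zero_iff.mp h
      subst this
      simp [pvALoop, pvAltCore]
  | cons a s ih =>
    cases t with
    | nil => simp at h
    | cons b t =>
      simp only [List.length_cons, Nat.succ_inj] at h
      by_cases hab : a = b
      · subst hab; simp [pvALoop, pvAltCore, ih t h]
      · have hlen : (a :: s).length ≠ (b :: t).length := by simp [h]
        simp only [pvALoop, pvAltCore, hab, if_false]
        rw [pvALoop_skipped (a :: s) t (by simp [h]), if_neg hlen]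
        simp

-- ===== VERDICT (by name: the statement is the Claim_ definition above) =====
theorem char_edit_distance_at_most_one_spec : Claim_equal_char_edit_distance_at_most_one := by
  intro left right _
  unfold Spec_char_edit_distance_at_most_one
  simp only [char_edit_distance_at_most_one, char_edit_distance_at_most_one_alt]
  generalize left.toList = l
  generalize right.toList = r
  by_cases heq : l = r
  · subst heq
    simp [pvAltCore_refl]
  · simp only [if_neg heq]
    by_cases hgap : ((l.length : Int) - (r.length : Int)).natAbs > 1
    · -- A returns false; B's gap test fires too
      simp only [if_pos hgap]
      by_cases hgt : l.length > r.length
      · simp only [if_pos hgt]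
        have : l.length - r.length > 1 := by omega
        simp [this]
      · simp only [if_neg hgt]
        have : r.length - l.length > 1 := by omega
        simp [this]
    · simp only [if_neg hgap]
      by_cases hlen : l.length = r.length
      · simp only [if_pos hlen]
        have hgt : ¬ l.length > r.length := by omega
        have hgap2 : ¬ (r.length - l.length > 1) := by omega
        simp only [if_neg hgt, if_neg hgap2]
        exact (pvAltCore_eq_count l r hlen).symm
      · simp only [if_neg hlen]
        by_cases hgt : l.length > r.length
        · have h1 : l.length = r.length + 1 := by omega
          have hgap2 : ¬ (l.length - r.length > 1) := by omega
          simp only [if_pos hgt, hgap2, if_false]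
          exact pvALoop_eq_altCore r l h1
        · have h1 : r.length = l.length + 1 := by omega
          have hgap2 : ¬ (r.length - l.length > 1) := by omega
          simp only [if_neg hgt, hgap2, if_false]
          exact pvALoop_eq_altCore l r h1
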